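-- pv_equiv track=rewrite | github.com/arshiaafzal/LION | img_classification/lion/curves.py | s_curve
-- ===== SOURCE A (Python) =====
-- def s_curve(grid):
--     rows = len(grid)
--     cols = len(grid[0])
--     order = []
--     for y in range(rows):
--         if y % 2 == 0:
--             # Left-to-right for even rows
--             order.extend((x, y) for x in range(cols))
--         else:
--             # Right-to-left for odd rows
--             order.extend((x, y) for x in reversed(range(cols)))
--     return order
-- ===== SOURCE B (Python) =====
-- def s_curve(grid):
--     rows = len(grid)
--     cols = len(grid[0])
--     order = []
--     for i in range(rows * cols):
--         y, p = divmod(i, cols)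
--         x = p if y % 2 == 0 else cols - 1 - p
--         order.append((x, y))
--     return order
-- ===== Notes on version B (the rewrite author's own statement) =====
-- stated objective: alternative
-- what changed: Replaces the nested row loop with a left/right parity branch by one flat loop over range(rows*cols) that recovers (x, y) from the index with divmod and a closed-form reversal cols-1-p.
import Mathlib
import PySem

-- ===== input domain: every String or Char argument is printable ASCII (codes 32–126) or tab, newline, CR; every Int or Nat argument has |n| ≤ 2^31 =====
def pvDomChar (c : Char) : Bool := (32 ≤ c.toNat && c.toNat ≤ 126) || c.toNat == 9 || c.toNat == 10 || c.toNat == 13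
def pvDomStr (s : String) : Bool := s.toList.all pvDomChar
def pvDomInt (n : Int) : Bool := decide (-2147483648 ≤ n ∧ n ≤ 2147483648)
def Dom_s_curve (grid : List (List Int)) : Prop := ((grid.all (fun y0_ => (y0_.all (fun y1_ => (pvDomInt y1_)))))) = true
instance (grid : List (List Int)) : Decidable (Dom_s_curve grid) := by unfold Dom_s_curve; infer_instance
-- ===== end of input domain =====

-- B replaces the nested row loop with a parity branch by one flat pass over
-- range(rows*cols), recovering (x, y) from the index with divmod (alternative
-- decomposition, same cost).

-- ===== PORT A =====
def s_curve (grid : List (List Int)) : List (Int × Int) :=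
  let rows : Int := grid.length
  let cols : Int := (PySem.List.pyGetD grid 0 []).length
  (PySem.List.pyRange 0 rows 1).foldl (fun order y =>
    if PySem.Int.mod y 2 == 0 then
      order ++ (PySem.List.pyRange 0 cols 1).map (fun x => (x, y))
    else
      order ++ ((PySem.List.pyRange 0 cols 1).reverse).map (fun x => (x, y))) []

-- ===== PORT B =====
def s_curve_alt (grid : List (List Int)) : List (Int × Int) :=
  let rows : Int := grid.length
  let cols : Int := (PySem.List.pyGetD grid 0 []).length
  (PySem.List.pyRange 0 (rows * cols) 1).foldl (fun order i =>
    let y := PySem.Int.floordiv i cols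
    let p := PySem.Int.mod i cols
    let x := if PySem.Int.mod y 2 == 0 then p else cols - 1 - p
    order ++ [(x, y)]) []

-- ===== PRECONDITION & SPEC =====
-- Pre_ excludes only the empty grid, on which both Pythons raise IndexError at grid[0].
def Pre_s_curve (grid : List (List Int)) : Prop := grid ≠ []
instance (grid : List (List Int)) : Decidable (Pre_s_curve grid) := by unfold Pre_s_curve; infer_instance
def pvWitness_s_curve : List (List Int) := [[1, 2], [3, 4], [5, 6]]

def Spec_s_curve (grid : List (List Int)) (out : List (Int × Int)) : Prop := out = s_curve_alt grid
instance (grid : List (List Int)) (out : List (Int × Int)) : Decidable (Spec_s_curve grid out) := by unfold Spec_s_curve; infer_instance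

-- ===== CLAIM (what is proved, stated in full; the proofs are below) =====
def Claim_equal_s_curve : Prop := ∀ (grid : List (List Int)), Dom_s_curve grid → Pre_s_curve grid → Spec_s_curve grid (s_curve grid)

-- ===== LEMMAS AND PROOFS =====

-- One row of B's flat loop: the indices i ∈ [r*c, r*c+c) decode to row r.
lemma block_lemma (r c : Nat) (acc : List (Int × Int)) :
    (PySem.List.pyRange ((r : Int) * c) ((r : Int) * c + c) 1).foldl (fun order i =>
      order ++ [(if PySem.Int.mod (PySem.Int.floordiv i (c : Int)) 2 == 0 then PySem.Int.mod i (c : Int)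
                 else (c : Int) - 1 - PySem.Int.mod i (c : Int), PySem.Int.floordiv i (c : Int))]) acc
    = (if PySem.Int.mod (r : Int) 2 == 0 then
        acc ++ (PySem.List.pyRange 0 (c : Int) 1).map (fun x => (x, (r : Int)))
      else
        acc ++ ((PySem.List.pyRange 0 (c : Int) 1).reverse).map (fun x => (x, (r : Int)))) := by
  rcases Nat.eq_zero_or_pos c with hc | hc
  · subst hc
    simp [PySem.List.pyRange_one_eq_nil (le_refl (0 : Int))]
  · have hcpos : (0 : Int) < c := by exact_mod_cast hc
    -- decode: for r*c ≤ i < r*c + c, floordiv i c = r and mod i c = i - r*c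
    have hdecode : ∀ i ∈ PySem.List.pyRange ((r : Int) * c) ((r : Int) * c + c) 1,
        PySem.Int.floordiv i c = r ∧ PySem.Int.mod i c = i - (r : Int) * c := by
      intro i hi
      rw [PySem.List.mem_pyRange_one] at hi
      have hfd : PySem.Int.floordiv i c = r := by
        rw [PySem.Int.floordiv_eq_iff_of_pos hcpos]
        constructor <;> [omega; nlinarith [hi.1, hi.2]]
      refine ⟨hfd, ?_⟩
      have := PySem.Int.floordiv_mul_add_mod i c
      rw [hfd] at this; omega
    rw [PySem.List.foldl_append_singleton_eq_map]
    rw [List.map_congr_left (l := PySem.List.pyRange ((r : Int) * c) ((r : Int) * c + c) 1)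
        (g := fun i => (if PySem.Int.mod (r : Int) 2 == 0 then i - (r : Int) * c
                        else (c : Int) - 1 - (i - (r : Int) * c), (r : Int)))
        (by intro i hi
            obtain ⟨h1, h2⟩ := hdecode i hi
            simp [h1, h2])]
    rw [PySem.List.pyRange_one ((r : Int) * c) ((r : Int) * c + c),
        PySem.List.pyRange_one 0 (c : Int)]
    have hlen : ((r : Int) * c + c - (r : Int) * c).toNat = c := by omega
    have h0 : ((c : Int) - 0).toNat = c := by omega
    rw [hlen, h0]
    by_cases hpar : PySem.Int.mod (r : Int) 2 == 0
    · simp only [hpar, if_true, List.map_map]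
      congr 1
      apply List.map_congr_left
      intro k hk
      simp
    · simp only [hpar, if_false, List.map_map, Bool.false_eq_true]
      congr 1
      apply List.ext_getElem
      · simp
      · intro k hk1 hk2
        simp at hk1
        simp [List.getElem_reverse]
        omega

-- The whole traversal: A's row loop equals B's flat loop (any nonneg rows/cols).
lemma main_lemma (r c : Nat) :
    (PySem.List.pyRange 0 (r : Int) 1).foldl (fun order y =>
      if PySem.Int.mod y 2 == 0 then
        order ++ (PySem.List.pyRange 0 (c : Int) 1).map (fun x => (x, y))
      else
        order ++ ((PySem.List.pyRange 0 (c : Int) 1).reverse).map (fun x => (x, y))) []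
    = (PySem.List.pyRange 0 ((r : Int) * c) 1).foldl (fun order i =>
      order ++ [(if PySem.Int.mod (PySem.Int.floordiv i (c : Int)) 2 == 0 then PySem.Int.mod i (c : Int)
                 else (c : Int) - 1 - PySem.Int.mod i (c : Int), PySem.Int.floordiv i (c : Int))]) [] := by
  induction r with
  | zero => simp [PySem.List.pyRange_one_eq_nil (le_refl (0 : Int))]
  | succ n ih =>
    have h1 : ((n + 1 : Nat) : Int) = (n : Int) + 1 := by push_cast; ring
    rw [h1, PySem.List.pyRange_one_succ_right (by positivity), List.foldl_append, ih,
        show ((n : Int) + 1) * c = (n : Int) * c + c from by ring, PySem.List.pyRange_one_append 0 ((n : Int) * c) ((n : Int) * c + c)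
          (by positivity) (by omega), List.foldl_append, block_lemma]
    simp only [List.foldl_cons, List.foldl_nil]

-- ===== VERDICT (by name: the statement is the Claim_ definition above) =====
theorem s_curve_spec : Claim_equal_s_curve := by
  intro grid _ _
  unfold Spec_s_curve s_curve s_curve_alt
  simpa using main_lemma grid.length (PySem.List.pyGetD grid 0 []).length
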